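-- pv_equiv track=rewrite | github.com/rfernandezdo/inventariographdrawio | azure_to_drawio.py | filter_items_and_dependencies
-- ===== SOURCE A (Python) =====
-- def filter_items_and_dependencies(items, dependencies, include_ids=None, exclude_ids=None):
--     """Filtra los items y dependencias según los IDs a incluir o excluir (y sus descendientes)."""
--     if not include_ids and not exclude_ids:
--         return items, dependencies
--
--     # Normalizar ids
--     include_ids = set(i.lower() for i in include_ids) if include_ids else None
--     exclude_ids = set(i.lower() for i in exclude_ids) if exclude_ids else set()
--
--     # Construir mapa de hijos para recorrer descendientes
--     child_map = {}
--     for src, tgt in dependencies: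
--         child_map.setdefault(tgt, set()).add(src)
--
--     def collect_descendants(start_ids):
--         result = set()
--         stack = list(start_ids)
--         while stack:
--             current = stack.pop()
--             if current not in result:
--                 result.add(current)
--                 stack.extend(child_map.get(current, []))
--         return result
--
--     all_ids = set(item['id'].lower() for item in items)
--     selected_ids = set()
--     if include_ids:
--         # Incluir solo los seleccionados y sus descendientes
--         selected_ids = collect_descendants(include_ids)
--         selected_ids.update(include_ids)
--     else:
--         selected_ids = all_ids
--     if exclude_ids:
--         # Excluir los seleccionados y sus descendientes
--         to_exclude = collect_descendants(exclude_ids)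
--         to_exclude.update(exclude_ids)
--         selected_ids = selected_ids - to_exclude
--
--     filtered_items = [item for item in items if item['id'].lower() in selected_ids]
--     filtered_dependencies = [(src, tgt) for src, tgt in dependencies if src in selected_ids and tgt in selected_ids]
--     return filtered_items, filtered_dependencies
-- ===== SOURCE B (Python) =====
-- def filter_items_and_dependencies(items, dependencies, include_ids=None, exclude_ids=None):
--     """Filtra items y dependencias por IDs incluidos/excluidos y sus descendientes."""
--     if not include_ids and not exclude_ids:
--         return items, dependencies
--
--     def closure(seeds):
--         # reachable-by-reversed-edges set, by |dependencies| relaxation passes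
--         s = set(seeds)
--         for _ in range(len(dependencies)):
--             for src, tgt in dependencies:
--                 if tgt in s:
--                     s.add(src)
--         return s
--
--     if include_ids:
--         selected = closure(i.lower() for i in include_ids)
--     else:
--         selected = set(item['id'].lower() for item in items)
--     if exclude_ids:
--         selected -= closure(i.lower() for i in exclude_ids)
--
--     filtered_items = [item for item in items if item['id'].lower() in selected]
--     filtered_dependencies = [(src, tgt) for src, tgt in dependencies
--                              if src in selected and tgt in selected]
--     return filtered_items, filtered_dependencies
-- ===== Notes on version B (the rewrite author's own statement) =====
-- stated objective: simpler
-- what changed: Replaces A's child_map adjacency dict plus explicit-stack DFS with a plain bounded fixpoint relaxation: len(dependencies) passes over the raw edge list, adding src whenever tgt is already selected; the include/exclude set logic and final comprehensions stay the straightforward part.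
import Mathlib
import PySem

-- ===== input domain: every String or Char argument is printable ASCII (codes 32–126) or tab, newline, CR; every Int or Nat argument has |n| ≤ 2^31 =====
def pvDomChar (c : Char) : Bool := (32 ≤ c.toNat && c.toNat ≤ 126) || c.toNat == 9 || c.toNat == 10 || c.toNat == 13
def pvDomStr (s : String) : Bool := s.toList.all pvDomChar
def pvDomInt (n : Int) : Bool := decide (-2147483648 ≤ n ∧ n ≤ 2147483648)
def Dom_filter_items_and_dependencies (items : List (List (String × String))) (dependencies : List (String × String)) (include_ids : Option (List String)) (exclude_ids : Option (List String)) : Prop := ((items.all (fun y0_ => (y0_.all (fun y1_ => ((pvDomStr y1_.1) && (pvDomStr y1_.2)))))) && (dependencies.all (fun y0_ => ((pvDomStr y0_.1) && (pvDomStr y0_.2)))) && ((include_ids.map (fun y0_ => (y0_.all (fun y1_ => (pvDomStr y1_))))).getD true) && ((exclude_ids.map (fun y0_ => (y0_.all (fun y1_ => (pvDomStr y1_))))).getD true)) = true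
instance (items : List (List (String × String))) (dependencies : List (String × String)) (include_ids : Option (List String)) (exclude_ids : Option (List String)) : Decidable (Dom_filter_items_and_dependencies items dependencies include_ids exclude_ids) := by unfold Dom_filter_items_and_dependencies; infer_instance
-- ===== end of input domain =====

-- B replaces A's child_map dict + explicit-stack DFS closure by |dependencies| relaxation
-- passes over the raw edge list (objective: simpler); equivalence proved on inputs where
-- every item carries an 'id' key (or no filter is active) — elsewhere the Python raises KeyError.
-- Python set iteration order is not modelled; it is only consumed here where the result is
-- order-independent (membership tests and the final order-preserving comprehensions).

-- ===== PORT A =====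
-- item['id'] in total form; Pre_ guarantees the key is present wherever this is evaluated
def pvItemIdA (it : List (String × String)) : String :=
  ((PySem.Dict.mk it).get? "id").getD ""

-- child_map.setdefault(tgt, set()).add(src): value gets src added, key position preserved
def pvChildMap (deps : List (String × String)) : PySem.Dict String (PySem.Set String) :=
  deps.foldl
    (fun m p => m.insert p.2 (PySem.Set.add (m.getD p.2 PySem.Set.empty) p.1))
    PySem.Dict.empty

-- all strings occurring in the dict's value sets (used only in the termination measure)
def pvVals (cm : PySem.Dict String (PySem.Set String)) : Finset String :=
  cm.values.flatten.toFinset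

theorem pvMem_vals (cm : PySem.Dict String (PySem.Set String)) (t s : String)
    (h : s ∈ cm.getD t PySem.Set.empty) : s ∈ pvVals cm := by
  rw [PySem.Dict.getD_eq_get?_getD] at h
  cases hg : cm.get? t with
  | none => rw [hg] at h; simp [PySem.Set.empty] at h
  | some v =>
      rw [hg] at h
      have hv : v ∈ cm.values := by
        have := PySem.Dict.mem_items_of_get?_eq_some cm hg
        simp only [PySem.Dict.values]
        exact List.mem_map.mpr ⟨(t, v), this, rfl⟩
      simp only [pvVals, List.mem_toFinset]
      exact List.mem_flatten.mpr ⟨v, hv, h⟩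

theorem pvMeasure_eq (cm : PySem.Dict String (PySem.Set String)) (result : List String)
    (current : String) (rest : List String) (h : current ∈ result) :
    ((rest.toFinset ∪ pvVals cm) \ result.toFinset) =
      (((current :: rest).toFinset ∪ pvVals cm) \ result.toFinset) := by
  ext x
  simp only [Finset.mem_sdiff, Finset.mem_union, List.mem_toFinset, List.mem_cons]
  constructor
  · rintro ⟨hx, hnx⟩; exact ⟨by tauto, hnx⟩
  · rintro ⟨hx, hnx⟩
    refine ⟨?_, hnx⟩
    rcases hx with (rfl | hx) | hx
    · exact absurd h hnx
    · exact Or.inl hx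
    · exact Or.inr hx

theorem pvMeasure_lt (cm : PySem.Dict String (PySem.Set String)) (result : PySem.Set String)
    (current : String) (rest : List String) (h : current ∉ result) :
    ((((cm.getD current PySem.Set.empty).reverse ++ rest).toFinset ∪ pvVals cm) \
        (PySem.Set.add result current).toFinset).card <
      (((current :: rest).toFinset ∪ pvVals cm) \ result.toFinset).card := by
  apply Finset.card_lt_card
  constructor
  · intro x hx
    simp only [Finset.mem_sdiff, Finset.mem_union, List.mem_toFinset, List.mem_append,
      List.mem_reverse, List.mem_cons] at hx ⊢
    obtain ⟨hx1, hx2⟩ := hx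
    have hnr : x ∉ result := fun hr => hx2 ((PySem.Set.mem_add result current x).mpr (Or.inl hr))
    refine ⟨?_, hnr⟩
    rcases hx1 with (hc | hr) | hv
    · exact Or.inr (pvMem_vals cm current x hc)
    · exact Or.inl (Or.inr hr)
    · exact Or.inr hv
  · intro hsub
    have hcur : current ∈ (((current :: rest).toFinset ∪ pvVals cm) \ result.toFinset) := by
      simp only [Finset.mem_sdiff, Finset.mem_union, List.mem_toFinset, List.mem_cons]
      exact ⟨Or.inl (Or.inl trivial), h⟩
    have := hsub hcur
    simp only [Finset.mem_sdiff, List.mem_toFinset] at this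
    exact this.2 ((PySem.Set.mem_add result current current).mpr (Or.inr rfl))

-- collect_descendants' while loop; the stack top is the list head (Python pops from the end)
def pvCollect (cm : PySem.Dict String (PySem.Set String)) (result : PySem.Set String)
    (stack : List String) : PySem.Set String :=
  match stack with
  | [] => result
  | current :: rest =>
      if current ∈ result then pvCollect cm result rest
      else pvCollect cm (PySem.Set.add result current)
        ((cm.getD current PySem.Set.empty).reverse ++ rest)
termination_by (((stack.toFinset ∪ pvVals cm) \ result.toFinset).card, stack.length)
decreasing_by
  · rw [← pvMeasure_eq cm result current rest (by assumption)]
    exact Prod.Lex.right _ (Nat.lt_succ_self _)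
  · exact Prod.Lex.left _ _ (pvMeasure_lt cm result current rest (by assumption))

def filter_items_and_dependencies (items : List (List (String × String))) (dependencies : List (String × String)) (include_ids : Option (List String)) (exclude_ids : Option (List String)) : (List (List (String × String))) × (List (String × String)) :=
  let incList := include_ids.getD []
  let excList := exclude_ids.getD []
  if incList.isEmpty && excList.isEmpty then (items, dependencies)
  else
    let includeSet : Option (PySem.Set String) :=
      if incList.isEmpty then none
      else some (PySem.Set.ofList (incList.map PySem.Str.lower))
    let excludeSet : PySem.Set String :=
      if excList.isEmpty then PySem.Set.empty
      else PySem.Set.ofList (excList.map PySem.Str.lower)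
    let childMap := pvChildMap dependencies
    let allIds : PySem.Set String :=
      PySem.Set.ofList (items.map (fun it => PySem.Str.lower (pvItemIdA it)))
    let selected : PySem.Set String :=
      match includeSet with
      | some s => PySem.Set.update (pvCollect childMap PySem.Set.empty s.reverse) s
      | none => allIds
    let selected2 : PySem.Set String :=
      if excludeSet.isEmpty then selected
      else
        PySem.Set.diff selected
          (PySem.Set.update (pvCollect childMap PySem.Set.empty excludeSet.reverse) excludeSet)
    (items.filter (fun it => PySem.Set.contains selected2 (PySem.Str.lower (pvItemIdA it))),
     dependencies.filter (fun p =>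
       PySem.Set.contains selected2 p.1 && PySem.Set.contains selected2 p.2))

-- ===== PORT B =====
def pvItemIdB (it : List (String × String)) : String :=
  ((PySem.Dict.mk it).get? "id").getD ""

-- one relaxation pass: for src, tgt in dependencies: if tgt in s: s.add(src)
def pvStep (s : PySem.Set String) (p : String × String) : PySem.Set String :=
  if PySem.Set.contains s p.2 then PySem.Set.add s p.1 else s

def pvPass (deps : List (String × String)) (s : PySem.Set String) : PySem.Set String :=
  deps.foldl pvStep s

-- closure(seeds): len(dependencies) relaxation passes over the raw edge list
def pvClosure (deps : List (String × String)) (seeds : List String) : PySem.Set String :=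
  (List.range deps.length).foldl (fun s _ => pvPass deps s) (PySem.Set.ofList seeds)

def filter_items_and_dependencies_alt (items : List (List (String × String))) (dependencies : List (String × String)) (include_ids : Option (List String)) (exclude_ids : Option (List String)) : (List (List (String × String))) × (List (String × String)) :=
  let incList := include_ids.getD []
  let excList := exclude_ids.getD []
  if incList.isEmpty && excList.isEmpty then (items, dependencies)
  else
    let selected : PySem.Set String :=
      if incList.isEmpty then
        PySem.Set.ofList (items.map (fun it => PySem.Str.lower (pvItemIdB it)))
      else pvClosure dependencies (incList.map PySem.Str.lower)
    let selected2 : PySem.Set String :=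
      if excList.isEmpty then selected
      else PySem.Set.diff selected (pvClosure dependencies (excList.map PySem.Str.lower))
    (items.filter (fun it => PySem.Set.contains selected2 (PySem.Str.lower (pvItemIdB it))),
     dependencies.filter (fun p =>
       PySem.Set.contains selected2 p.1 && PySem.Set.contains selected2 p.2))

-- ===== PRECONDITION & SPEC =====
-- Pre_ excludes only inputs where A raises KeyError: some item lacks the 'id' key while
-- an include/exclude filter is active (B raises the same KeyError there).
def Pre_filter_items_and_dependencies (items : List (List (String × String))) (dependencies : List (String × String)) (include_ids : Option (List String)) (exclude_ids : Option (List String)) : Prop :=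
  ((include_ids.getD []).isEmpty = true ∧ (exclude_ids.getD []).isEmpty = true) ∨
  (∀ it ∈ items, ((PySem.Dict.mk it).get? "id").isSome = true)
instance (items : List (List (String × String))) (dependencies : List (String × String)) (include_ids : Option (List String)) (exclude_ids : Option (List String)) : Decidable (Pre_filter_items_and_dependencies items dependencies include_ids exclude_ids) := by unfold Pre_filter_items_and_dependencies; infer_instance

def pvWitness_filter_items_and_dependencies : (List (List (String × String))) × (List (String × String)) × Option (List String) × Option (List String) :=
  ([[("id", "a")], [("id", "b")]], [("b", "a")], some ["A"], none)

def Spec_filter_items_and_dependencies (items : List (List (String × String))) (dependencies : List (String × String)) (include_ids : Option (List String)) (exclude_ids : Option (List String)) (out : (List (List (String × String))) × (List (String × String))) : Prop := out = filter_items_and_dependencies_alt items dependencies include_ids exclude_ids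
instance (items : List (List (String × String))) (dependencies : List (String × String)) (include_ids : Option (List String)) (exclude_ids : Option (List String)) (out : (List (List (String × String))) × (List (String × String))) : Decidable (Spec_filter_items_and_dependencies items dependencies include_ids exclude_ids out) := by unfold Spec_filter_items_and_dependencies; infer_instance

-- ===== CLAIM (what is proved, stated in full; the proofs are below) =====
def Claim_equal_filter_items_and_dependencies : Prop := ∀ (items : List (List (String × String))) (dependencies : List (String × String)) (include_ids : Option (List String)) (exclude_ids : Option (List String)), Dom_filter_items_and_dependencies items dependencies include_ids exclude_ids → Pre_filter_items_and_dependencies items dependencies include_ids exclude_ids → Spec_filter_items_and_dependencies items dependencies include_ids exclude_ids (filter_items_and_dependencies items dependencies include_ids exclude_ids)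


-- ===== LEMMAS AND PROOFS =====

-- x is reachable from the (lowered) seed list by repeatedly following an edge backwards
inductive PvReach (deps : List (String × String)) (seeds : List String) : String → Prop
  | seed (x : String) : x ∈ seeds → PvReach deps seeds x
  | step (s t : String) : (s, t) ∈ deps → PvReach deps seeds t → PvReach deps seeds s

theorem pvChildMap_mem_aux (l : List (String × String))
    (m : PySem.Dict String (PySem.Set String)) (s t : String) :
    (s ∈ (l.foldl (fun m p => m.insert p.2 (PySem.Set.add (m.getD p.2 PySem.Set.empty) p.1)) m).getD t PySem.Set.empty) ↔
      s ∈ m.getD t PySem.Set.empty ∨ (s, t) ∈ l := by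
  induction l generalizing m with
  | nil => simp
  | cons p ps ih =>
      rw [List.foldl_cons, ih, PySem.Dict.getD_insert, List.mem_cons]
      by_cases h : t = p.2
      · subst h
        simp [PySem.Set.mem_add, Prod.ext_iff]
        tauto
      · simp only [if_neg h, Prod.ext_iff]
        tauto

theorem pvChildMap_mem (deps : List (String × String)) (s t : String) :
    (s ∈ (pvChildMap deps).getD t PySem.Set.empty) ↔ (s, t) ∈ deps := by
  have := pvChildMap_mem_aux deps PySem.Dict.empty s t
  simpa [pvChildMap, PySem.Dict.getD_empty, PySem.Set.empty] using this

theorem pvCollect_mono (cm : PySem.Dict String (PySem.Set String)) (result : PySem.Set String)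
    (stack : List String) : ∀ x ∈ result, x ∈ pvCollect cm result stack := by
  fun_induction pvCollect with
  | case1 => intro x hx; exact hx
  | case2 result current rest hmem ih => exact ih
  | case3 result current rest hmem ih =>
      intro x hx; exact ih x ((PySem.Set.mem_add result current x).mpr (Or.inl hx))

theorem pvCollect_stack (cm : PySem.Dict String (PySem.Set String)) (result : PySem.Set String)
    (stack : List String) : ∀ x ∈ stack, x ∈ pvCollect cm result stack := by
  fun_induction pvCollect with
  | case1 => intro x hx; cases hx
  | case2 result current rest hmem ih =>
      intro x hx
      rcases List.mem_cons.mp hx with rfl | hx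
      · exact pvCollect_mono _ result rest x hmem
      · exact ih x hx
  | case3 result current rest hmem ih =>
      intro x hx
      rcases List.mem_cons.mp hx with rfl | hx
      · exact pvCollect_mono _ _ _ x ((PySem.Set.mem_add result x x).mpr (Or.inr rfl))
      · exact ih x (List.mem_append.mpr (Or.inr hx))

theorem pvCollect_sound (cm : PySem.Dict String (PySem.Set String)) (result : PySem.Set String)
    (stack : List String) (P : String → Prop)
    (hstep : ∀ s t, s ∈ cm.getD t PySem.Set.empty → P t → P s) :
    (∀ a ∈ result, P a) → (∀ a ∈ stack, P a) → ∀ x ∈ pvCollect cm result stack, P x := by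
  fun_induction pvCollect with
  | case1 result => exact fun hres _ x hx => hres x hx
  | case2 result current rest hmem ih =>
      exact fun hres hstk => ih hres (fun a ha => hstk a (List.mem_cons_of_mem _ ha))
  | case3 result current rest hmem ih =>
      intro hres hstk
      have hcur : P current := hstk current List.mem_cons_self
      refine ih ?_ ?_
      · intro a ha
        rcases (PySem.Set.mem_add result current a).mp ha with ha | rfl
        · exact hres a ha
        · exact hcur
      · intro a ha
        rcases List.mem_append.mp ha with ha | ha
        · exact hstep a current (List.mem_reverse.mp ha) hcur
        · exact hstk a (List.mem_cons_of_mem _ ha)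

theorem pvCollect_closed (cm : PySem.Dict String (PySem.Set String)) (result : PySem.Set String)
    (stack : List String) :
    (∀ t ∈ result, ∀ s ∈ cm.getD t PySem.Set.empty, s ∈ result ∨ s ∈ stack) →
    ∀ t ∈ pvCollect cm result stack, ∀ s ∈ cm.getD t PySem.Set.empty,
      s ∈ pvCollect cm result stack := by
  fun_induction pvCollect with
  | case1 result =>
      intro hinv t ht s hs
      rcases hinv t ht s hs with h | h
      · exact h
      · cases h
  | case2 result current rest hmem ih =>
      intro hinv
      refine ih ?_
      intro t ht s hs
      rcases hinv t ht s hs with h | h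
      · exact Or.inl h
      · rcases List.mem_cons.mp h with rfl | h
        · exact Or.inl hmem
        · exact Or.inr h
  | case3 result current rest hmem ih =>
      intro hinv
      refine ih ?_
      intro t ht s hs
      rcases (PySem.Set.mem_add result current t).mp ht with ht | rfl
      · rcases hinv t ht s hs with h | h
        · exact Or.inl ((PySem.Set.mem_add result current s).mpr (Or.inl h))
        · rcases List.mem_cons.mp h with rfl | h
          · exact Or.inl ((PySem.Set.mem_add result s s).mpr (Or.inr rfl))
          · exact Or.inr (List.mem_append.mpr (Or.inr h))
      · exact Or.inr (List.mem_append.mpr (Or.inl (List.mem_reverse.mpr hs)))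

-- A's closure (DFS result updated with the seed set) is exactly reachability
theorem pvMemA (deps : List (String × String)) (seeds : List String) (x : String) :
    (x ∈ PySem.Set.update
        (pvCollect (pvChildMap deps) PySem.Set.empty (PySem.Set.ofList seeds).reverse)
        (PySem.Set.ofList seeds)) ↔ PvReach deps seeds x := by
  rw [PySem.Set.mem_update]
  constructor
  · rintro (hR | hs)
    · refine pvCollect_sound _ _ _ (PvReach deps seeds) ?_ ?_ ?_ x hR
      · exact fun s t hst ht => PvReach.step s t ((pvChildMap_mem deps s t).mp hst) ht
      · intro a ha; simp [PySem.Set.empty] at ha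
      · exact fun a ha =>
          PvReach.seed a ((PySem.Set.mem_ofList seeds a).mp (List.mem_reverse.mp ha))
    · exact PvReach.seed x ((PySem.Set.mem_ofList seeds x).mp hs)
  · intro h
    induction h with
    | seed y hy => exact Or.inr ((PySem.Set.mem_ofList seeds y).mpr hy)
    | step s t hst ht iht =>
        have htR : t ∈ pvCollect (pvChildMap deps) PySem.Set.empty
            (PySem.Set.ofList seeds).reverse := by
          rcases iht with hR | hs
          · exact hR
          · exact pvCollect_stack _ _ _ t (List.mem_reverse.mpr hs)
        exact Or.inl (pvCollect_closed (pvChildMap deps) PySem.Set.empty _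
          (by intro t' ht'; simp [PySem.Set.empty] at ht') t htR s
          ((pvChildMap_mem deps s t).mpr hst))

-- ---- B side ----

theorem pvStep_mono (s : PySem.Set String) (p : String × String) (x : String) (hx : x ∈ s) :
    x ∈ pvStep s p := by
  unfold pvStep
  split
  · exact (PySem.Set.mem_add s p.1 x).mpr (Or.inl hx)
  · exact hx

theorem pvFold_mono (l : List (String × String)) (s : PySem.Set String) (x : String)
    (hx : x ∈ s) : x ∈ l.foldl pvStep s := by
  induction l generalizing s with
  | nil => exact hx
  | cons p ps ih => exact ih (pvStep s p) (pvStep_mono s p x hx)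

theorem pvFold_sound (P : String → Prop) (l : List (String × String)) (s : PySem.Set String)
    (hP : ∀ p ∈ l, P p.2 → P p.1) (h : ∀ x ∈ s, P x) : ∀ x ∈ l.foldl pvStep s, P x := by
  induction l generalizing s with
  | nil => exact h
  | cons p ps ih =>
      refine ih (pvStep s p) (fun q hq => hP q (List.mem_cons_of_mem _ hq)) ?_
      intro x hx
      unfold pvStep at hx
      split at hx
      · rcases (PySem.Set.mem_add s p.1 x).mp hx with hx | rfl
        · exact h x hx
        · exact hP p List.mem_cons_self (h p.2 ((PySem.Set.contains_iff s p.2).mp (by assumption)))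
      · exact h x hx

theorem pvFold_edge (l : List (String × String)) (p : String × String) :
    p ∈ l → ∀ s : PySem.Set String, p.2 ∈ s → p.1 ∈ l.foldl pvStep s := by
  induction l with
  | nil => intro hp; cases hp
  | cons q qs ih =>
      intro hp s ht
      rcases List.mem_cons.mp hp with rfl | hp'
      · refine pvFold_mono qs (pvStep s p) p.1 ?_
        unfold pvStep
        rw [if_pos ((PySem.Set.contains_iff s p.2).mpr ht)]
        exact (PySem.Set.mem_add s p.1 p.1).mpr (Or.inr rfl)
      · exact ih hp' (pvStep s q) (pvStep_mono s q p.2 ht)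

theorem pvStep_append (s : PySem.Set String) (p : String × String) :
    ∃ d, pvStep s p = s ++ d ∧ ∀ x ∈ d, x = p.1 := by
  unfold pvStep PySem.Set.add
  split
  · split
    · exact ⟨[], by simp⟩
    · exact ⟨[p.1], by simp⟩
  · exact ⟨[], by simp⟩

theorem pvFold_append (l : List (String × String)) (s : PySem.Set String) :
    ∃ d, l.foldl pvStep s = s ++ d ∧ ∀ x ∈ d, x ∈ l.map Prod.fst := by
  induction l generalizing s with
  | nil => exact ⟨[], by simp⟩
  | cons p ps ih =>
      obtain ⟨e, he, hesub⟩ := pvStep_append s p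
      obtain ⟨d, hd, hdsub⟩ := ih (pvStep s p)
      refine ⟨e ++ d, ?_, ?_⟩
      · rw [List.foldl_cons, hd, he, List.append_assoc]
      · intro x hx
        rcases List.mem_append.mp hx with hx | hx
        · exact List.mem_map.mpr ⟨p, List.mem_cons_self, (hesub x hx).symm⟩
        · have := hdsub x hx
          simp only [List.map_cons, List.mem_cons]
          rcases List.mem_map.mp this with ⟨q, hq, rfl⟩
          exact Or.inr (List.mem_map.mpr ⟨q, hq, rfl⟩)

theorem pvStep_nodup (s : PySem.Set String) (p : String × String) (h : s.Nodup) :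
    (pvStep s p).Nodup := by
  unfold pvStep
  split
  · exact PySem.Set.nodup_add s p.1 h
  · exact h

theorem pvFold_nodup (l : List (String × String)) (s : PySem.Set String) (h : s.Nodup) :
    (l.foldl pvStep s).Nodup := by
  induction l generalizing s with
  | nil => exact h
  | cons p ps ih => exact ih (pvStep s p) (pvStep_nodup s p h)

theorem pvRangeFoldl (g : PySem.Set String → PySem.Set String) (init : PySem.Set String)
    (n : Nat) : (List.range n).foldl (fun s _ => g s) init = g^[n] init := by
  induction n with
  | zero => simp
  | succ n ih =>
      rw [List.range_succ, List.foldl_append, ih, Function.iterate_succ_apply']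
      rfl

theorem pvIter_mono (deps : List (String × String)) (n : Nat) (s : PySem.Set String)
    (x : String) (hx : x ∈ s) : x ∈ (pvPass deps)^[n] s := by
  induction n generalizing s with
  | zero => exact hx
  | succ n ih =>
      rw [Function.iterate_succ_apply]
      exact ih (pvPass deps s) (pvFold_mono deps s x hx)

theorem pvIter_nodup (deps : List (String × String)) (n : Nat) (s : PySem.Set String)
    (h : s.Nodup) : ((pvPass deps)^[n] s).Nodup := by
  induction n generalizing s with
  | zero => exact h
  | succ n ih =>
      rw [Function.iterate_succ_apply]
      exact ih (pvPass deps s) (pvFold_nodup deps s h)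

theorem pvIter_append (deps : List (String × String)) (n : Nat) (s : PySem.Set String) :
    ∃ d, (pvPass deps)^[n] s = s ++ d ∧ ∀ x ∈ d, x ∈ deps.map Prod.fst := by
  induction n with
  | zero => exact ⟨[], by simp⟩
  | succ n ih =>
      obtain ⟨d, hd, hdsub⟩ := ih
      obtain ⟨e, he, hesub⟩ := pvFold_append deps ((pvPass deps)^[n] s)
      refine ⟨d ++ e, ?_, ?_⟩
      · rw [Function.iterate_succ_apply']
        show pvPass deps ((pvPass deps)^[n] s) = s ++ (d ++ e)
        rw [show pvPass deps ((pvPass deps)^[n] s) = (pvPass deps)^[n] s ++ e from he, hd,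
          List.append_assoc]
      · intro x hx
        rcases List.mem_append.mp hx with hx | hx
        · exact hdsub x hx
        · exact hesub x hx

theorem pvClosure_closed (deps : List (String × String)) (seeds : List String)
    (p : String × String) (hp : p ∈ deps) (ht : p.2 ∈ pvClosure deps seeds) :
    p.1 ∈ pvClosure deps seeds := by
  unfold pvClosure at ht ⊢
  rw [pvRangeFoldl (pvPass deps) (PySem.Set.ofList seeds) deps.length] at ht ⊢
  set g := pvPass deps with hg
  set n := deps.length with hn
  set S0 := PySem.Set.ofList seeds with hS0
  by_cases hfix : ∃ k, k ≤ n ∧ g (g^[k] S0) = g^[k] S0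
  · obtain ⟨k, hk, hfx⟩ := hfix
    have hiter : g^[n] S0 = g^[k] S0 := by
      have h2 : g^[n - k] (g^[k] S0) = g^[k] S0 := Function.iterate_fixed hfx (n - k)
      calc g^[n] S0 = g^[(n - k) + k] S0 := by rw [Nat.sub_add_cancel hk]
        _ = g^[n - k] (g^[k] S0) := by rw [Function.iterate_add_apply]
        _ = g^[k] S0 := h2
    rw [hiter] at ht ⊢
    have : p.1 ∈ g (g^[k] S0) := pvFold_edge deps p hp (g^[k] S0) ht
    rwa [hfx] at this
  · simp only [not_exists, not_and] at hfix
    have hlen : ∀ k, k ≤ n → S0.length + k ≤ (g^[k] S0).length := by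
      intro k
      induction k with
      | zero => intro _; simp
      | succ k ihk =>
          intro hk
          have hk' : k ≤ n := Nat.le_of_succ_le hk
          have h1 := ihk hk'
          obtain ⟨e, he, _⟩ := pvFold_append deps (g^[k] S0)
          have hene : e ≠ [] := by
            intro h0
            exact hfix k hk' (by rw [show g (g^[k] S0) = g^[k] S0 ++ e from he, h0, List.append_nil])
          have : 1 ≤ e.length := List.length_pos_iff.mpr hene
          rw [Function.iterate_succ_apply', show g (g^[k] S0) = g^[k] S0 ++ e from he,
            List.length_append]
          omega
    obtain ⟨D, hD, hDsub⟩ := pvIter_append deps n S0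
    have hnd : ((g^[n] S0)).Nodup := pvIter_nodup deps n S0 (PySem.Set.nodup_ofList seeds)
    have hDnd : D.Nodup := List.Nodup.of_append_right (hD ▸ hnd)
    have hlenD : n ≤ D.length := by
      have := hlen n le_rfl
      rw [hD, List.length_append] at this
      omega
    have hsub : D.toFinset ⊆ (deps.map Prod.fst).toFinset := fun x hx =>
      List.mem_toFinset.mpr (hDsub x (List.mem_toFinset.mp hx))
    have hcard : (deps.map Prod.fst).toFinset.card ≤ D.toFinset.card := by
      have h1 : (deps.map Prod.fst).toFinset.card ≤ (deps.map Prod.fst).length :=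
        List.toFinset_card_le _
      have h2 : D.toFinset.card = D.length := List.toFinset_card_of_nodup hDnd
      rw [List.length_map] at h1
      omega
    have heq := Finset.eq_of_subset_of_card_le hsub hcard
    have hpD : p.1 ∈ D := by
      have hmem : p.1 ∈ (deps.map Prod.fst).toFinset :=
        List.mem_toFinset.mpr (List.mem_map.mpr ⟨p, hp, rfl⟩)
      rw [← heq] at hmem
      exact List.mem_toFinset.mp hmem
    rw [hD]
    exact List.mem_append.mpr (Or.inr hpD)

theorem pvMemB (deps : List (String × String)) (seeds : List String) (x : String) :
    (x ∈ pvClosure deps seeds) ↔ PvReach deps seeds x := by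
  constructor
  · intro hx
    unfold pvClosure at hx
    rw [pvRangeFoldl] at hx
    have hgen : ∀ (m : Nat) (s : PySem.Set String), (∀ y ∈ s, PvReach deps seeds y) →
        ∀ y ∈ (pvPass deps)^[m] s, PvReach deps seeds y := by
      intro m
      induction m with
      | zero => intro s hs; exact hs
      | succ m ihm =>
          intro s hs
          rw [Function.iterate_succ_apply]
          refine ihm (pvPass deps s) ?_
          refine pvFold_sound (PvReach deps seeds) deps s ?_ hs
          intro p hp hPt
          exact PvReach.step p.1 p.2 (by simpa using hp) hPt
    exact hgen deps.length (PySem.Set.ofList seeds)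
      (fun y hy => PvReach.seed y ((PySem.Set.mem_ofList seeds y).mp hy)) x hx
  · intro h
    induction h with
    | seed y hy =>
        unfold pvClosure
        rw [pvRangeFoldl]
        exact pvIter_mono deps deps.length _ y ((PySem.Set.mem_ofList seeds y).mpr hy)
    | step s t hst ht iht => exact pvClosure_closed deps seeds (s, t) hst iht

-- ---- assembly ----

theorem pvContains_congr (s t : PySem.Set String) (h : ∀ x, x ∈ s ↔ x ∈ t) (y : String) :
    PySem.Set.contains s y = PySem.Set.contains t y := by
  by_cases hy : y ∈ s
  · rw [(PySem.Set.contains_iff s y).mpr hy, (PySem.Set.contains_iff t y).mpr ((h y).mp hy)]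
  · have h1 : PySem.Set.contains s y = false := by
      cases hc : PySem.Set.contains s y with
      | false => rfl
      | true => exact absurd ((PySem.Set.contains_iff s y).mp hc) hy
    have h2 : PySem.Set.contains t y = false := by
      cases hc : PySem.Set.contains t y with
      | false => rfl
      | true => exact absurd ((h y).mpr ((PySem.Set.contains_iff t y).mp hc)) hy
    rw [h1, h2]

theorem pvOfListMap_isEmpty_false (l : List String) (h : l.isEmpty = false) :
    (PySem.Set.ofList (l.map PySem.Str.lower)).isEmpty = false := by
  cases l with
  | nil => cases h
  | cons x xs => rw [List.map_cons, PySem.Set.ofList_cons]; rfl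

theorem pvFilter_congr (items : List (List (String × String)))
    (deps : List (String × String)) (s t : PySem.Set String) (h : ∀ x, x ∈ s ↔ x ∈ t) :
    (items.filter (fun it => PySem.Set.contains s (PySem.Str.lower (pvItemIdA it))),
      deps.filter (fun p => PySem.Set.contains s p.1 && PySem.Set.contains s p.2)) =
    (items.filter (fun it => PySem.Set.contains t (PySem.Str.lower (pvItemIdB it))),
      deps.filter (fun p => PySem.Set.contains t p.1 && PySem.Set.contains t p.2)) := by
  rw [Prod.mk.injEq]
  constructor
  · refine List.filter_congr ?_
    intro it _
    exact pvContains_congr s t h (PySem.Str.lower (pvItemIdA it))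
  · refine List.filter_congr ?_
    intro p _
    rw [pvContains_congr s t h p.1, pvContains_congr s t h p.2]

-- ===== VERDICT (by name: the statement is the Claim_ definition above) =====
theorem filter_items_and_dependencies_spec : Claim_equal_filter_items_and_dependencies := by
  intro items deps inc exc _hdom _hpre
  unfold Spec_filter_items_and_dependencies filter_items_and_dependencies filter_items_and_dependencies_alt
  by_cases h1 : (inc.getD ([] : List String)).isEmpty
  · by_cases h2 : (exc.getD ([] : List String)).isEmpty
    · simp only [h1, h2, Bool.and_self, if_true]
    · have h2' : (exc.getD ([] : List String)).isEmpty = false := by simpa using h2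
      have hne := pvOfListMap_isEmpty_false _ h2'
      simp only [h1, h2', hne, Bool.and_false, if_true, if_false, Bool.false_eq_true]
      refine pvFilter_congr items deps _ _ ?_
      intro x
      rw [PySem.Set.mem_diff, PySem.Set.mem_diff]
      have hexc := (pvMemA deps (List.map PySem.Str.lower (exc.getD [])) x).trans
        (pvMemB deps (List.map PySem.Str.lower (exc.getD [])) x).symm
      have hall : (x ∈ PySem.Set.ofList (List.map (fun it => PySem.Str.lower (pvItemIdA it)) items)) ↔
          (x ∈ PySem.Set.ofList (List.map (fun it => PySem.Str.lower (pvItemIdB it)) items)) := Iff.rfl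
      tauto
  · have h1' : (inc.getD ([] : List String)).isEmpty = false := by simpa using h1
    by_cases h2 : (exc.getD ([] : List String)).isEmpty
    · simp only [h1', h2, Bool.and_true, if_true, if_false, Bool.false_eq_true,
        PySem.Set.empty, List.isEmpty_nil]
      refine pvFilter_congr items deps _ _ ?_
      intro x
      exact (pvMemA deps (List.map PySem.Str.lower (inc.getD [])) x).trans
        (pvMemB deps (List.map PySem.Str.lower (inc.getD [])) x).symm
    · have h2' : (exc.getD ([] : List String)).isEmpty = false := by simpa using h2
      have hne := pvOfListMap_isEmpty_false _ h2'
      simp only [h1', h2', hne, Bool.and_false, if_false, Bool.false_eq_true]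
      refine pvFilter_congr items deps _ _ ?_
      intro x
      rw [PySem.Set.mem_diff, PySem.Set.mem_diff]
      have hinc := (pvMemA deps (List.map PySem.Str.lower (inc.getD [])) x).trans
        (pvMemB deps (List.map PySem.Str.lower (inc.getD [])) x).symm
      have hexc := (pvMemA deps (List.map PySem.Str.lower (exc.getD [])) x).trans
        (pvMemB deps (List.map PySem.Str.lower (exc.getD [])) x).symm
      tauto
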